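-- pv_equiv track=rewrite | github.com/NoeFischer/podcast_summaries | src/summarizer/process.py | balance_splits
-- ===== SOURCE A (Python) =====
-- def balance_splits(transcript, estimated_parts):
--     """Adjust split points to balance transcript across parts."""
--     part_starts = [0]
--     step_size = len(transcript) // estimated_parts
--     for i in range(1, estimated_parts):
--         part_end_index = part_starts[-1] + step_size
--         part_end = (
--             transcript.find("\n", part_end_index) + 1
--             if "\n" in transcript[part_end_index:]
--             else len(transcript)
--         )
--         part_starts.append(part_end)
--     part_starts.append(len(transcript))
--     return part_starts
-- ===== SOURCE B (Python) =====
-- def balance_splits(transcript, estimated_parts):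
--     """Adjust split points to balance transcript across parts.
--
--     Alternative strategy: precompute the list of newline-end positions once,
--     then walk a pointer forward through it (targets are nondecreasing), instead
--     of re-slicing and re-scanning the transcript for each part.
--     """
--     n = len(transcript)
--     step_size = n // estimated_parts
--     ends = [i + 1 for i, c in enumerate(transcript) if c == "\n"]
--     part_starts = [0]
--     last = 0
--     k = 0
--     for _ in range(1, estimated_parts):
--         target = last + step_size
--         while k < len(ends) and ends[k] <= target:
--             k += 1
--         last = ends[k] if k < len(ends) else n
--         part_starts.append(last)
--     part_starts.append(n)
--     return part_starts
-- ===== Notes on version B (the rewrite author's own statement) =====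
-- stated objective: alternative
-- what changed: Instead of re-slicing the transcript and scanning it for the next newline on every iteration, B precomputes the list of newline end positions once and walks a single forward pointer through it; it trades A's repeated C-level slice-and-scan for one explicit pass plus a monotone pointer walk.
import Mathlib
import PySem

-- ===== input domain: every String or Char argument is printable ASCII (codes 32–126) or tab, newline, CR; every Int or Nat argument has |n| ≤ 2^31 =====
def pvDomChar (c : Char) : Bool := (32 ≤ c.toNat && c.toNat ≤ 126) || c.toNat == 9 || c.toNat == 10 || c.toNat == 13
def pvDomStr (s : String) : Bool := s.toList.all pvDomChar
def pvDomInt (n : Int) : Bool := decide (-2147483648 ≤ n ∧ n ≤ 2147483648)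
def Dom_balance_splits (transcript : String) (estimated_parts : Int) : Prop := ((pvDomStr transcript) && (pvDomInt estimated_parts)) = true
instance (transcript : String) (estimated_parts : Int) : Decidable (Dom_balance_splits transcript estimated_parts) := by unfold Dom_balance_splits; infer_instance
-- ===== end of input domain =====

-- B replaces A's per-part slice-and-scan of the transcript with a precomputed
-- newline-position list walked once by a forward pointer (objective: alternative).

-- ===== PORT A =====
-- loop body of A, extracted as a helper (literal transliteration of the Python loop body)
def pvStepA (cs : List Char) (n step_size : Int) (part_starts : List Int) : List Int :=
  let part_end_index := (PySem.List.pyGet? part_starts (-1)).getD 0 + step_size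
  let part_end :=
    if PySem.Chars.isIn ['\n'] (PySem.Chars.slice cs (some part_end_index) none)
    then PySem.Chars.findFrom cs ['\n'] part_end_index none + 1
    else n
  part_starts ++ [part_end]

def balance_splits (transcript : String) (estimated_parts : Int) : List Int :=
  let cs := transcript.toList
  let n : Int := cs.length
  let step_size := PySem.Int.floordiv n estimated_parts
  let part_starts :=
    (PySem.List.pyRange 1 estimated_parts 1).foldl
      (fun part_starts _ => pvStepA cs n step_size part_starts) [0]
  part_starts ++ [n]

-- ===== PORT B =====
-- loop body of B: advance the pointer (drop consumed newline ends), pick the next start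
def pvStepB (n step_size : Int) (st : List Int × Int × List Int) : List Int × Int × List Int :=
  let target := st.2.1 + step_size
  let rem := st.2.2.dropWhile (fun e => decide (e ≤ target))
  let last := match rem with | e :: _ => e | [] => n
  (st.1 ++ [last], last, rem)

def balance_splits_alt (transcript : String) (estimated_parts : Int) : List Int :=
  let cs := transcript.toList
  let n : Int := cs.length
  let step_size := PySem.Int.floordiv n estimated_parts
  let ends := ((PySem.List.enumerate cs 0).filter (fun p => p.2 == '\n')).map (fun p => p.1 + 1)
  let st :=
    (PySem.List.pyRange 1 estimated_parts 1).foldl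
      (fun st _ => pvStepB n step_size st) ([0], 0, ends)
  st.1 ++ [n]

-- ===== PRECONDITION & SPEC =====
-- Pre_ excludes only estimated_parts = 0, on which Python A raises ZeroDivisionError.
def Pre_balance_splits (transcript : String) (estimated_parts : Int) : Prop := estimated_parts ≠ 0
instance (transcript : String) (estimated_parts : Int) : Decidable (Pre_balance_splits transcript estimated_parts) := by unfold Pre_balance_splits; infer_instance
def pvWitness_balance_splits : String × Int := ("ab\ncd\nef", 3)

def Spec_balance_splits (transcript : String) (estimated_parts : Int) (out : List Int) : Prop := out = balance_splits_alt transcript estimated_parts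
instance (transcript : String) (estimated_parts : Int) (out : List Int) : Decidable (Spec_balance_splits transcript estimated_parts out) := by unfold Spec_balance_splits; infer_instance

-- ===== CLAIM (what is proved, stated in full; the proofs are below) =====
def Claim_equal_balance_splits : Prop := ∀ (transcript : String) (estimated_parts : Int), Dom_balance_splits transcript estimated_parts → Pre_balance_splits transcript estimated_parts → Spec_balance_splits transcript estimated_parts (balance_splits transcript estimated_parts)

-- ===== LEMMAS AND PROOFS =====

/-- End positions (index + 1) of the newlines of `cs`, indices counted from `off`. -/
def pvNlEnds (off : Int) (cs : List Char) : List Int :=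
  match cs with
  | [] => []
  | c :: rest => if c = '\n' then (off + 1) :: pvNlEnds (off + 1) rest else pvNlEnds (off + 1) rest

theorem pvNlEnds_pos {off : Int} {cs : List Char} {e : Int} (h : e ∈ pvNlEnds off cs) : off < e := by
  induction cs generalizing off with
  | nil => simp [pvNlEnds] at h
  | cons c rest ih =>
    unfold pvNlEnds at h
    split at h
    · rcases List.mem_cons.1 h with h | h
      · omega
      · have := ih h; omega
    · have := ih h; omega

theorem pvNlEnds_le {off : Int} {cs : List Char} {e : Int} (h : e ∈ pvNlEnds off cs) :
    e ≤ off + cs.length := by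
  induction cs generalizing off with
  | nil => simp [pvNlEnds] at h
  | cons c rest ih =>
    unfold pvNlEnds at h
    simp only [List.length_cons]
    split at h
    · rcases List.mem_cons.1 h with h | h
      · push_cast; omega
      · have := ih h; push_cast at this ⊢; omega
    · have := ih h; push_cast at this ⊢; omega

theorem pvNlEnds_nil_iff {off : Int} {cs : List Char} : pvNlEnds off cs = [] ↔ '\n' ∉ cs := by
  induction cs generalizing off with
  | nil => simp [pvNlEnds]
  | cons c rest ih =>
    unfold pvNlEnds
    by_cases hc : c = '\n'
    · simp [hc]
    · simp only [hc, if_false, ih, List.mem_cons]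
      constructor
      · intro hr hor
        rcases hor with hor | hor
        · exact hc hor.symm
        · exact hr hor
      · intro hr hm
        exact hr (Or.inr hm)

theorem pvNlEnds_dropWhile {cs : List Char} {off k : Int} (h : off ≤ k) :
    (pvNlEnds off cs).dropWhile (fun e => decide (e ≤ k)) = pvNlEnds k (cs.drop (k - off).toNat) := by
  induction cs generalizing off with
  | nil => simp [pvNlEnds]
  | cons c rest ih =>
    by_cases hk : off + 1 ≤ k
    · have hdrop : (c :: rest).drop (k - off).toNat = rest.drop (k - (off + 1)).toNat := by
        have h1 : (k - off).toNat = (k - (off + 1)).toNat + 1 := by omega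
        simp [h1]
      rw [hdrop]
      by_cases hc : c = '\n'
      · rw [show pvNlEnds off (c :: rest) = (off + 1) :: pvNlEnds (off + 1) rest from by
          simp [pvNlEnds, hc]]
        rw [List.dropWhile_cons, if_pos (by simp [hk])]
        exact ih hk
      · rw [show pvNlEnds off (c :: rest) = pvNlEnds (off + 1) rest from by simp [pvNlEnds, hc]]
        exact ih hk
    · have hko : k = off := by omega
      subst hko
      rw [show (c :: rest).drop (k - k).toNat = c :: rest from by simp]
      refine List.dropWhile_eq_self_iff.2 ?_
      intro h0
      have hm := pvNlEnds_pos (List.getElem_mem h0)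
      simp only [decide_eq_true_eq]
      omega

theorem pvNlEnds_head {cs : List Char} {off : Int} {j : Nat}
    (hj : cs[j]? = some '\n') (hmin : ∀ i < j, cs[i]? ≠ some '\n') :
    (pvNlEnds off cs).head? = some (off + j + 1) := by
  induction cs generalizing off j with
  | nil => simp at hj
  | cons c rest ih =>
    cases j with
    | zero =>
      simp at hj
      unfold pvNlEnds
      simp [hj]
    | succ j' =>
      have hc : c ≠ '\n' := by
        intro hc
        exact hmin 0 (Nat.succ_pos _) (by simp [hc])
      unfold pvNlEnds
      simp only [hc, if_false]
      have := ih (j := j') (off := off + 1) (by simpa using hj)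
        (fun i hi => by simpa using hmin (i + 1) (by omega))
      rw [this]
      congr 1
      push_cast
      ring

theorem pvSingleton_prefix {a : Char} {l : List Char} : [a] <+: l ↔ l.head? = some a := by
  cases l with
  | nil => simp
  | cons x xs => simp [List.cons_prefix_iff]

/-- A's per-step "find the next newline by scanning" equals B's "first precomputed end > target". -/
theorem pvStep_value (cs : List Char) (target : Int) (ht : 0 ≤ target) :
    (if PySem.Chars.isIn ['\n'] (PySem.Chars.slice cs (some target) none)
     then PySem.Chars.findFrom cs ['\n'] target none + 1
     else (cs.length : Int))
    = (match pvNlEnds target (cs.drop target.toNat) with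
       | e :: _ => e
       | [] => (cs.length : Int)) := by
  have hslice : PySem.Chars.slice cs (some target) none = cs.drop target.toNat := by
    rw [PySem.Chars.slice_eq_listSlice, PySem.List.slice_from _ ht]
  by_cases hin : PySem.Chars.isIn ['\n'] (cs.drop target.toNat) = true
  · have hinf : ['\n'] <:+: cs.drop target.toNat := (PySem.Chars.isIn_iff_infix _ _).1 hin
    have hmem : '\n' ∈ cs.drop target.toNat := (List.singleton_infix_iff _ _).1 hinf
    have hne : cs.drop target.toNat ≠ [] := by intro h; rw [h] at hmem; simp at hmem
    have hlt : target.toNat < cs.length := by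
      by_contra h
      exact hne (List.drop_eq_nil_of_le (by omega))
    have hfind_ne : PySem.Chars.find (cs.drop target.toNat) ['\n'] ≠ -1 :=
      (PySem.Chars.find_ne_neg_one_iff _ _).2 hinf
    have hff : PySem.Chars.findFrom cs ['\n'] target none =
        target + PySem.Chars.find (cs.drop target.toNat) ['\n'] := by
      have h2 := PySem.Chars.findFrom_natCast cs ['\n'] target.toNat (by omega)
      rw [Int.toNat_of_nonneg ht] at h2
      rw [h2, if_neg hfind_ne]
    set f := PySem.Chars.find (cs.drop target.toNat) ['\n'] with hf
    have hf0 : 0 ≤ f := (PySem.Chars.find_nonneg_iff _ _).2 hinf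
    obtain ⟨hpre, hmin⟩ := PySem.Chars.find_spec (s := cs.drop target.toNat) (sub := ['\n']) hf0
    have hget : (cs.drop target.toNat)[f.toNat]? = some '\n' := by
      have h2 := pvSingleton_prefix.1 hpre
      rw [List.head?_drop] at h2
      exact h2
    have hmin' : ∀ i < f.toNat, (cs.drop target.toNat)[i]? ≠ some '\n' := by
      intro i hi hcon
      exact hmin i hi (pvSingleton_prefix.2 (by rwa [List.head?_drop]))
    have hhead := pvNlEnds_head (off := target) hget hmin'
    rcases hr : pvNlEnds target (cs.drop target.toNat) with _ | ⟨e, rest⟩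
    · rw [hr] at hhead; simp at hhead
    · rw [hr] at hhead
      simp at hhead
      rw [hslice]
      simp only [hin, if_true, hff]
      omega
  · have hnin : '\n' ∉ cs.drop target.toNat := fun hmem =>
      hin ((PySem.Chars.isIn_iff_infix _ _).2 ((List.singleton_infix_iff _ _).2 hmem))
    rw [hslice]
    simp only [Bool.not_eq_true] at hin
    rw [hin, pvNlEnds_nil_iff.2 hnin]
    simp

/-- The list built by B's comprehension is `pvNlEnds`. -/
theorem pvEnds_eq (cs : List Char) (off : Int) :
    ((PySem.List.enumerate cs off).filter (fun p => p.2 == '\n')).map (fun p => p.1 + 1)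
      = pvNlEnds off cs := by
  induction cs generalizing off with
  | nil => simp [PySem.List.enumerate_nil, pvNlEnds]
  | cons c rest ih =>
    rw [PySem.List.enumerate_cons]
    unfold pvNlEnds
    by_cases hc : c = '\n' <;> simp [hc, ih]

/-- Loop invariant tying A's list state to B's (starts, last, remaining-ends) state. -/
def pvInv (cs : List Char) (n : Int) (ps : List Int) (last : Int) (rem : List Int) : Prop :=
  ps.getLast? = some last ∧ 0 ≤ last ∧ last ≤ n ∧
  ∃ pre, pvNlEnds 0 cs = pre ++ rem ∧ ∀ e ∈ pre, e ≤ last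

theorem pvStep_eq {cs : List Char} {n step : Int} {ps : List Int} {last : Int} {rem : List Int}
    (hn : n = (cs.length : Int)) (hstep : 0 ≤ step) (hInv : pvInv cs n ps last rem) :
    pvStepA cs n step ps = (pvStepB n step (ps, last, rem)).1 ∧
    pvInv cs n (pvStepB n step (ps, last, rem)).1 (pvStepB n step (ps, last, rem)).2.1
      (pvStepB n step (ps, last, rem)).2.2 := by
  obtain ⟨hlastEq, hlast0, hlastn, pre, hsplit, hpre⟩ := hInv
  have htarget0 : 0 ≤ last + step := by omega
  set target := last + step with htarg
  -- the dropped list equals pvNlEnds from target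
  have hdropAll : (pvNlEnds 0 cs).dropWhile (fun e => decide (e ≤ target)) =
      rem.dropWhile (fun e => decide (e ≤ target)) := by
    rw [hsplit, List.dropWhile_append]
    have : pre.dropWhile (fun e => decide (e ≤ target)) = [] := by
      rw [List.dropWhile_eq_nil_iff]
      intro x hx
      have := hpre x hx
      simp; omega
    simp [this]
  have hrem' : rem.dropWhile (fun e => decide (e ≤ target)) =
      pvNlEnds target (cs.drop target.toNat) := by
    rw [← hdropAll, pvNlEnds_dropWhile htarget0]
    congr 2
    omega
  -- equal appended value
  have hval := pvStep_value cs target htarget0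
  rw [← hn] at hval
  constructor
  · unfold pvStepA pvStepB
    simp only [PySem.List.pyGet?_neg_one, hlastEq, Option.getD_some, ← htarg, hrem']
    congr 1
    rw [hval]
  · unfold pvStepB
    simp only [← htarg, hrem']
    set rem' := pvNlEnds target (cs.drop target.toNat) with hremdef
    set last' := (match rem' with | e :: _ => e | [] => n) with hlast'
    have hlast'_mem : rem' ≠ [] → last' ∈ rem' := by
      intro h
      rcases rem' with _ | ⟨e, rest⟩
      · exact absurd rfl h
      · simp [hlast']
    have hrem'_sub : ∀ e ∈ rem', e ∈ pvNlEnds 0 cs := by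
      intro e he
      rw [hsplit]
      refine List.mem_append_right _ ?_
      rw [← hrem'] at he
      exact (List.dropWhile_sublist _).subset he
    have hlt_last' : ∀ e ∈ rem', target < e := fun e he => pvNlEnds_pos he
    have hlast'0 : 0 ≤ last' := by
      rcases hr : rem' with _ | ⟨e, rest⟩
      · simp [hlast', hr]; omega
      · have : target < e := hlt_last' e (by rw [hr]; simp)
        simp [hlast', hr]; omega
    have hlast'n : last' ≤ n := by
      rcases hr : rem' with _ | ⟨e, rest⟩
      · simp [hlast', hr]
      · have he : e ∈ pvNlEnds 0 cs := hrem'_sub e (by rw [hr]; simp)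
        have := pvNlEnds_le he
        simp [hlast', hr]; omega
    have hlast_le : last ≤ last' := by
      rcases hr : rem' with _ | ⟨e, rest⟩
      · simp [hlast', hr]; omega
      · have : target < e := hlt_last' e (by rw [hr]; simp)
        simp [hlast', hr]; omega
    refine ⟨by simp, hlast'0, hlast'n, pre ++ rem.takeWhile (fun e => decide (e ≤ target)), ?_, ?_⟩
    · rw [hsplit, List.append_assoc, ← hrem', List.takeWhile_append_dropWhile]
    · intro e he
      rcases List.mem_append.1 he with he | he
      · have := hpre e he; omega
      · have hle : e ≤ target := by
          simpa using List.mem_takeWhile_imp he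
        rcases hr : rem' with _ | ⟨e', rest⟩
        · -- last' = n; e came from pvNlEnds 0 cs
          have he' : e ∈ pvNlEnds 0 cs := by
            rw [hsplit]
            refine List.mem_append_right _ ((List.takeWhile_sublist _).subset he)
          have := pvNlEnds_le he'
          simp [hlast', hr]; omega
        · have : target < e' := hlt_last' e' (by rw [hr]; simp)
          simp [hlast', hr]; omega

theorem pvLoop_eq (l : List Int) {cs : List Char} {n step : Int}
    (hn : n = (cs.length : Int)) (hstep : 0 ≤ step) :
    ∀ (ps : List Int) (last : Int) (rem : List Int), pvInv cs n ps last rem →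
    l.foldl (fun ps _ => pvStepA cs n step ps) ps =
      (l.foldl (fun st _ => pvStepB n step st) (ps, last, rem)).1 := by
  induction l with
  | nil => intro ps last rem hInv; simpa using hInv.1 ▸ rfl
  | cons x xs ih =>
    intro ps last rem hInv
    obtain ⟨heq, hInv'⟩ := pvStep_eq hn hstep hInv
    simp only [List.foldl_cons]
    rw [heq]
    exact ih _ _ _ hInv'

-- ===== VERDICT (by name: the statement is the Claim_ definition above) =====
theorem balance_splits_spec : Claim_equal_balance_splits := by
  intro transcript estimated_parts _ _
  unfold Spec_balance_splits balance_splits balance_splits_alt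
  dsimp only
  by_cases hp : estimated_parts ≤ 1
  · rw [PySem.List.pyRange_one_eq_nil (by omega)]
    simp
  · have hstep : 0 ≤ PySem.Int.floordiv ((transcript.toList.length : Int)) estimated_parts := by
      rw [PySem.Int.floordiv_eq_ediv_of_pos (by omega)]
      exact Int.ediv_nonneg (by positivity) (by omega)
    have hInv : pvInv transcript.toList ((transcript.toList.length : Int)) [0] 0
        (((PySem.List.enumerate transcript.toList 0).filter (fun p => p.2 == '\n')).map
          (fun p => p.1 + 1)) := by
      refine ⟨rfl, le_refl 0, by positivity, [], ?_, by simp⟩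
      rw [pvEnds_eq]
      simp
    rw [pvLoop_eq (PySem.List.pyRange 1 estimated_parts 1) rfl hstep [0] 0 _ hInv]
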